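-- pv_equiv track=rewrite | github.com/rameshpav1321/hackerrank_inteview_practice | misc/01.get_optimal_string.py | get_optimal_string
-- ===== SOURCE A (Python) =====
-- def get_optimal_string(str):
--     str_len=len(str)
--     ones_count=str.count('1')
--     zeros_count=str_len-ones_count
--     if ones_count==str_len:
--         return str
--     count=0
--     res=''
--     flag=True
--     while ones_count>0 and zeros_count>0:
--         if flag:
--             flag=False
--             ones_count-=1
--             res='1'+res
--         else:
--             flag=True
--             zeros_count-=1
--             res='0'+res
--     if ones_count==0:
--         for i in range(zeros_count):
--             res='0'+res
--     else:
--         for i in range(ones_count):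
--             res='1'+res
--     return res
-- ===== SOURCE B (Python) =====
-- def get_optimal_string(str):
--     n = len(str)
--     o = str.count('1')
--     z = n - o
--     if o == n:
--         return str
--     if o > z:
--         return '1' * (o - z) + '01' * z
--     if o == 0:
--         return '0' * z
--     return '0' * (z - o + 1) + '10' * (o - 1) + '1'
-- ===== Notes on version B (the rewrite author's own statement) =====
-- stated objective: simpler
-- what changed: Replaces A's alternating character-by-character prepend loop (plus two tail prepend loops) with a closed-form string expression computed from the counts of ones and zeros alone.
import Mathlib
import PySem

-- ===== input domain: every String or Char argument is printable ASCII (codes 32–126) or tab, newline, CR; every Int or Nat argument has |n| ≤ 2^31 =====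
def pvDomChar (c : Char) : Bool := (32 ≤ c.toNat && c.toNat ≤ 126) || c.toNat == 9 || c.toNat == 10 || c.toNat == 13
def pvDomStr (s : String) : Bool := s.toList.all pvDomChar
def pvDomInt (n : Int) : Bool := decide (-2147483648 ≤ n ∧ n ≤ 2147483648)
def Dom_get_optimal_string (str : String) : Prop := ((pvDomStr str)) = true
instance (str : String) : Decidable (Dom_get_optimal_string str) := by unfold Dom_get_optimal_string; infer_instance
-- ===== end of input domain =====

-- B replaces A's character-by-character alternating prepend loop with a closed-form
-- expression in the two counts (simpler, and avoids quadratic string prepending).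

-- ===== PORT A =====
-- the while loop of A: state (ones_count, zeros_count, flag, res); res is the list of
-- characters of the accumulating string (prepend = cons)
def pvWloop (ones zeros : Nat) (flag : Bool) (res : List Char) : Nat × Nat × List Char :=
  if _h : ones > 0 ∧ zeros > 0 then
    if flag then pvWloop (ones - 1) zeros false ('1' :: res)
    else pvWloop ones (zeros - 1) true ('0' :: res)
  else (ones, zeros, res)
termination_by ones + zeros
decreasing_by all_goals omega

def get_optimal_string (str : String) : String :=
  let l := str.toList
  let str_len := l.length
  let ones_count := l.count '1'
  let zeros_count := str_len - ones_count
  if ones_count = str_len then str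
  else
    let s := pvWloop ones_count zeros_count true []
    if s.1 = 0 then
      String.mk ((List.range s.2.1).foldl (fun r _ => '0' :: r) s.2.2)
    else
      String.mk ((List.range s.1).foldl (fun r _ => '1' :: r) s.2.2)

-- ===== PORT B =====
def get_optimal_string_alt (str : String) : String :=
  let l := str.toList
  let n := l.length
  let o := l.count '1'
  let z := n - o
  if o = n then str
  else if o > z then String.mk (List.replicate (o - z) '1' ++ (List.replicate z ['0', '1']).flatten)
  else if o = 0 then String.mk (List.replicate z '0')
  else String.mk (List.replicate (z - o + 1) '0' ++ (List.replicate (o - 1) ['1', '0']).flatten ++ ['1'])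

-- ===== PRECONDITION & SPEC =====
def Spec_get_optimal_string (str : String) (out : String) : Prop := out = get_optimal_string_alt str
instance (str : String) (out : String) : Decidable (Spec_get_optimal_string str out) := by unfold Spec_get_optimal_string; infer_instance

-- ===== CLAIM (what is proved, stated in full; the proofs are below) =====
def Claim_equal_get_optimal_string : Prop := ∀ (str : String), Dom_get_optimal_string str → Spec_get_optimal_string str (get_optimal_string str)

-- ===== LEMMAS AND PROOFS =====

-- '0','1' pairs as A's loop prepends them (innermost pair last prepended)
def pvPairs : Nat → List Char
  | 0 => []
  | k + 1 => '0' :: '1' :: pvPairs k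

theorem pvPairs_snoc (k : Nat) (l : List Char) :
    pvPairs k ++ '0' :: '1' :: l = pvPairs (k + 1) ++ l := by
  induction k with
  | zero => rfl
  | succ k ih => simpa [pvPairs] using ih

theorem pvWloop_eq (o : Nat) : ∀ (z : Nat) (res : List Char), pvWloop o z true res =
    if o = 0 ∨ z = 0 then (o, z, res)
    else if o ≤ z then (0, z - o + 1, '1' :: pvPairs (o - 1) ++ res)
    else (o - z, 0, pvPairs z ++ res) := by
  induction o with
  | zero => intro z res; rw [pvWloop]; simp
  | succ o ih =>
    intro z res
    match z with
    | 0 => rw [pvWloop]; simp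
    | z + 1 =>
      rw [pvWloop, dif_pos ⟨Nat.succ_pos o, Nat.succ_pos z⟩, if_pos rfl, Nat.add_sub_cancel,
        pvWloop]
      by_cases ho : o = 0
      · subst ho
        rw [dif_neg (by omega), if_neg (by omega), if_pos (by omega)]
        simp [pvPairs]
      · rw [dif_pos ⟨Nat.pos_of_ne_zero ho, Nat.succ_pos z⟩, if_neg (by simp),
          Nat.add_sub_cancel, ih, if_neg (show ¬(o + 1 = 0 ∨ z + 1 = 0) by omega)]
        by_cases hz : z = 0
        · subst hz
          rw [if_pos (Or.inr rfl), if_neg (by omega)]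
          simp [pvPairs]
        · rw [if_neg (show ¬(o = 0 ∨ z = 0) by omega)]
          by_cases hle : o ≤ z
          · rw [if_pos hle, if_pos (by omega)]
            have h2 : pvPairs (o - 1) ++ '0' :: '1' :: res = pvPairs o ++ res := by
              rw [pvPairs_snoc, show o - 1 + 1 = o by omega]
            have e : z - o + 1 = z + 1 - (o + 1) + 1 := by omega
            simp only [List.cons_append, h2, e]
          · rw [if_neg hle, if_neg (by omega), pvPairs_snoc,
              show o - z = o + 1 - (z + 1) by omega]

theorem pvFoldPrepend (c : Char) (k : Nat) (res : List Char) :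
    (List.range k).foldl (fun r _ => c :: r) res = List.replicate k c ++ res := by
  induction k with
  | zero => simp
  | succ k ih =>
    rw [List.range_succ, List.foldl_append, ih, List.replicate_succ]
    simp

theorem pvPairs_eq_flatten (k : Nat) :
    pvPairs k = (List.replicate k ['0', '1']).flatten := by
  induction k with
  | zero => rfl
  | succ k ih => simp [pvPairs, List.replicate_succ, ih]

theorem pvPairs_rot (k : Nat) :
    '1' :: pvPairs k = (List.replicate k ['1', '0']).flatten ++ ['1'] := by
  induction k with
  | zero => rfl
  | succ k ih => simp [pvPairs, List.replicate_succ, ih]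

-- ===== VERDICT (by name: the statement is the Claim_ definition above) =====
theorem get_optimal_string_spec : Claim_equal_get_optimal_string := by
  intro str _
  unfold Spec_get_optimal_string get_optimal_string get_optimal_string_alt
  generalize str.toList = l
  have hon : List.count '1' l ≤ l.length := List.count_le_length
  by_cases h1 : List.count '1' l = l.length
  · simp [h1]
  · rw [if_neg h1, if_neg h1]
    generalize hn : l.length = n at h1 hon ⊢
    generalize ho : List.count '1' l = o at h1 hon ⊢
    by_cases h0 : o = 0
    · subst h0
      simp [pvWloop_eq, pvFoldPrepend]
    · by_cases hle : o ≤ n - o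
      · simp [pvWloop_eq, h0, hle, Nat.not_lt.mpr hle, pvFoldPrepend, pvPairs_rot,
          show ¬(n - o = 0) by omega]
      · simp [pvWloop_eq, h0, hle, pvPairs_eq_flatten,
          show n - o < o by omega, show ¬(o - (n - o) = 0) by omega,
          show ¬(n - o = 0) by omega]
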